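-- pv_equiv track=rewrite | github.com/SunilKumarba2955/GeeksforGeeks-Solutions | Medium/Count possible ways to construct buildings/count-possible-ways-to-construct-buildings.py | TotalWays
-- ===== SOURCE A (Python) =====
-- def TotalWays(N):
-- 	# Code here
-- 	MOD = 10**9+7
-- 	a,b=1,1
-- 	for i in range(1, N+1):
-- 	    cur = (a+b)%MOD
-- 	    a = b
-- 	    b = cur
-- 	return (b*b)%MOD
-- ===== SOURCE B (Python) =====
-- def TotalWays(N):
--     MOD = 10**9 + 7
--     def fib_pair(n):
--         # returns (F(n) % MOD, F(n+1) % MOD), F(0)=0, F(1)=1, by fast doubling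
--         if n == 0:
--             return (0, 1)
--         a, b = fib_pair(n >> 1)
--         c = (a * (2 * b - a)) % MOD
--         d = (a * a + b * b) % MOD
--         if n & 1:
--             return (d, (c + d) % MOD)
--         else:
--             return (c, d)
--     n = N + 2 if N > 0 else 2
--     f = fib_pair(n)[0]
--     return (f * f) % MOD
-- ===== Notes on version B (the rewrite author's own statement) =====
-- stated objective: faster
-- what changed: Replaced the O(N) iterative Fibonacci loop by fast-doubling recursion computing F(N+2) modulo the same prime in O(log N) multiplications, then squaring.
import Mathlib
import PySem

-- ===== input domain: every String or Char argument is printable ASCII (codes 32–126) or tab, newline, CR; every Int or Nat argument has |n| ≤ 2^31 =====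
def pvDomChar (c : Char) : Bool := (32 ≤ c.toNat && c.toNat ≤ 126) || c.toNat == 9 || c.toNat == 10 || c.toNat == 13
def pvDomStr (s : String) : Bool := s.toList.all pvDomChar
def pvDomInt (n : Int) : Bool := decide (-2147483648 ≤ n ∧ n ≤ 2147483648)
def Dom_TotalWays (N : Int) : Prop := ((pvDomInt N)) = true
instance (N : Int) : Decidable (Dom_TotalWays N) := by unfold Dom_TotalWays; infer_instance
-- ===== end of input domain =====

-- B replaces A's O(N) Fibonacci loop by fast-doubling recursion (O(log N)); objective: faster.

-- ===== PORT A =====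
-- literal port of A: loop i in range(1, N+1) updating (a, b) -> (b, (a+b) % MOD), return b*b % MOD
def TotalWays (N : Int) : Int :=
  let MOD : Int := 10 ^ 9 + 7
  let s := (PySem.List.pyRange 1 (N + 1) 1).foldl
    (fun (ab : Int × Int) _ => (ab.2, PySem.Int.mod (ab.1 + ab.2) MOD)) (1, 1)
  PySem.Int.mod (s.2 * s.2) MOD

-- ===== PORT B =====
-- fib_pair from Source B: fast doubling, returns (F(n) % MOD, F(n+1) % MOD); n >> 1 is n / 2, n & 1 is n % 2
def fibPairMOD (n : Nat) : Int × Int :=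
  if h : n = 0 then (0, 1)
  else
    let p := fibPairMOD (n / 2)
    let a := p.1
    let b := p.2
    let c := PySem.Int.mod (a * (2 * b - a)) (10 ^ 9 + 7)
    let d := PySem.Int.mod (a * a + b * b) (10 ^ 9 + 7)
    if n % 2 = 1 then (d, PySem.Int.mod (c + d) (10 ^ 9 + 7)) else (c, d)
termination_by n
decreasing_by exact Nat.div_lt_self (Nat.pos_of_ne_zero h) (by omega)

def TotalWays_alt (N : Int) : Int :=
  let n : Nat := if N > 0 then (N + 2).toNat else 2
  let f := (fibPairMOD n).1
  PySem.Int.mod (f * f) (10 ^ 9 + 7)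

-- ===== PRECONDITION & SPEC =====
def Spec_TotalWays (N : Int) (out : Int) : Prop := out = TotalWays_alt N
instance (N : Int) (out : Int) : Decidable (Spec_TotalWays N out) := by unfold Spec_TotalWays; infer_instance

-- ===== CLAIM (what is proved, stated in full; the proofs are below) =====
def Claim_equal_TotalWays : Prop := ∀ (N : Int), Dom_TotalWays N → Spec_TotalWays N (TotalWays N)

-- ===== LEMMAS AND PROOFS =====

-- the modulus, positive
lemma pvM_pos : (0 : Int) < 10 ^ 9 + 7 := by norm_num

lemma pv_emod_self (x : Int) : x % (10 ^ 9 + 7) ≡ x [ZMOD (10 ^ 9 + 7)] :=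
  Int.emod_emod_of_dvd x dvd_rfl

-- fib doubling identities over Int
lemma pv_fib_two_mul_int (m : Nat) :
    (Nat.fib (2 * m) : Int) = (Nat.fib m : Int) * (2 * (Nat.fib (m + 1) : Int) - (Nat.fib m : Int)) := by
  have h : Nat.fib m ≤ 2 * Nat.fib (m + 1) :=
    le_trans (Nat.fib_le_fib_succ) (by omega)
  rw [Nat.fib_two_mul]
  zify [h]

lemma pv_fib_two_mul_add_one_int (m : Nat) :
    (Nat.fib (2 * m + 1) : Int) =
      (Nat.fib m : Int) * (Nat.fib m : Int) + (Nat.fib (m + 1) : Int) * (Nat.fib (m + 1) : Int) := by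
  rw [Nat.fib_two_mul_add_one]
  push_cast
  ring

-- fast doubling computes Fibonacci mod M
lemma fibPairMOD_eq (n : Nat) :
    fibPairMOD n = ((Nat.fib n : Int) % (10 ^ 9 + 7), (Nat.fib (n + 1) : Int) % (10 ^ 9 + 7)) := by
  induction n using Nat.strong_induction_on with
  | _ n ih =>
    rw [fibPairMOD]
    by_cases h : n = 0
    · simp [h]
    · have hrec := ih (n / 2) (Nat.div_lt_self (Nat.pos_of_ne_zero h) (by omega))
      rw [dif_neg h, hrec]
      simp only [PySem.Int.mod_eq_emod_of_pos pvM_pos]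
      set M : Int := 10 ^ 9 + 7 with hM
      set m := n / 2 with hm
      set x : Int := (Nat.fib m : Int) with hx'
      set y : Int := (Nat.fib (m + 1) : Int) with hy'
      have hx : (x % M) % M = x % M := Int.emod_emod_of_dvd x dvd_rfl
      have hy : (y % M) % M = y % M := Int.emod_emod_of_dvd y dvd_rfl
      have hc : ((x % M) * (2 * (y % M) - (x % M))) % M = (Nat.fib (2 * m) : Int) % M := by
        have h1 : ((x % M) * (2 * (y % M) - (x % M))) % M = (x * (2 * y - x)) % M :=
          Int.ModEq.mul hx (Int.ModEq.sub (Int.ModEq.mul_left 2 hy) hx)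
        rw [h1, ← pv_fib_two_mul_int m]
      have hd : ((x % M) * (x % M) + (y % M) * (y % M)) % M = (Nat.fib (2 * m + 1) : Int) % M := by
        have h1 : ((x % M) * (x % M) + (y % M) * (y % M)) % M = (x * x + y * y) % M :=
          Int.ModEq.add (Int.ModEq.mul hx hx) (Int.ModEq.mul hy hy)
        rw [h1, ← pv_fib_two_mul_add_one_int m]
      have hcd : ((Nat.fib (2 * m) : Int) % M + (Nat.fib (2 * m + 1) : Int) % M) % M
          = (Nat.fib (2 * m + 2) : Int) % M := by
        have h1 : ((Nat.fib (2 * m) : Int) % M + (Nat.fib (2 * m + 1) : Int) % M) % M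
            = ((Nat.fib (2 * m) : Int) + (Nat.fib (2 * m + 1) : Int)) % M :=
          Int.ModEq.add (Int.emod_emod_of_dvd _ dvd_rfl) (Int.emod_emod_of_dvd _ dvd_rfl)
        have h2 : (Nat.fib (2 * m) : Int) + (Nat.fib (2 * m + 1) : Int) = (Nat.fib (2 * m + 2) : Int) := by
          have := Nat.fib_add_two (n := 2 * m)
          push_cast [this]
          rfl
        rw [h1, h2]
      by_cases hpar : n % 2 = 1
      · have hn : n = 2 * m + 1 := by omega
        rw [if_pos hpar, hn, hc, hd, show 2 * m + 1 + 1 = 2 * m + 2 from by omega, hcd]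
      · have hn : n = 2 * m := by omega
        rw [if_neg hpar, hn, hc, hd]

-- A's loop invariant
lemma pv_loop (l : List Int) (k : Nat) :
    l.foldl (fun (ab : Int × Int) _ => (ab.2, PySem.Int.mod (ab.1 + ab.2) (10 ^ 9 + 7)))
        ((Nat.fib (k + 1) : Int) % (10 ^ 9 + 7), (Nat.fib (k + 2) : Int) % (10 ^ 9 + 7))
      = ((Nat.fib (k + 1 + l.length) : Int) % (10 ^ 9 + 7),
         (Nat.fib (k + 2 + l.length) : Int) % (10 ^ 9 + 7)) := by
  induction l generalizing k with
  | nil => simp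
  | cons x xs ih =>
    simp only [List.foldl_cons]
    rw [PySem.Int.mod_eq_emod_of_pos pvM_pos]
    have hsum : ((Nat.fib (k + 1) : Int) % (10 ^ 9 + 7) + (Nat.fib (k + 2) : Int) % (10 ^ 9 + 7)) % (10 ^ 9 + 7)
        = (Nat.fib (k + 3) : Int) % (10 ^ 9 + 7) := by
      have : ((Nat.fib (k + 1) : Int) % (10 ^ 9 + 7) + (Nat.fib (k + 2) : Int) % (10 ^ 9 + 7))
          ≡ (Nat.fib (k + 1) : Int) + (Nat.fib (k + 2) : Int) [ZMOD (10 ^ 9 + 7)] :=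
        Int.ModEq.add (pv_emod_self _) (pv_emod_self _)
      calc ((Nat.fib (k + 1) : Int) % (10 ^ 9 + 7) + (Nat.fib (k + 2) : Int) % (10 ^ 9 + 7)) % (10 ^ 9 + 7)
          = ((Nat.fib (k + 1) : Int) + (Nat.fib (k + 2) : Int)) % (10 ^ 9 + 7) := this
        _ = (Nat.fib (k + 3) : Int) % (10 ^ 9 + 7) := by
            have h3 : (Nat.fib (k + 1) : Int) + (Nat.fib (k + 2) : Int) = (Nat.fib (k + 3) : Int) := by
              have := Nat.fib_add_two (n := k + 1)
              push_cast [this, show k + 1 + 1 = k + 2 from by omega]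
              rfl
            rw [h3]
    rw [hsum]
    have := ih (k + 1)
    simpa [Nat.add_comm, Nat.add_assoc, Nat.add_left_comm] using this

-- ===== VERDICT (by name: the statement is the Claim_ definition above) =====
theorem TotalWays_spec : Claim_equal_TotalWays := by
  intro N _
  unfold Spec_TotalWays TotalWays TotalWays_alt
  by_cases hN : N > 0
  · simp only [if_pos hN]
    have hstart : ((1 : Int), (1 : Int))
        = ((Nat.fib 1 : Int) % (10 ^ 9 + 7), (Nat.fib 2 : Int) % (10 ^ 9 + 7)) := by
      norm_num [Nat.fib_one, Nat.fib_two]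
    rw [hstart, pv_loop]
    have hlen : (PySem.List.pyRange 1 (N + 1) 1).length = N.toNat := by
      rw [PySem.List.length_pyRange_one]; omega
    have hn2 : (N + 2).toNat = N.toNat + 2 := by omega
    rw [hlen, fibPairMOD_eq, hn2, show 0 + 1 + N.toNat = N.toNat + 1 from by omega,
        show 0 + 2 + N.toNat = N.toNat + 2 from by omega]
  · simp only [if_neg hN]
    rw [PySem.List.pyRange_one_eq_nil (by omega), fibPairMOD_eq]
    norm_num [Nat.fib]
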